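-- pv_equiv track=rewrite | github.com/rebuilder945/FL_research | implement/utils.py | get_target_lines_span
-- ===== SOURCE A (Python) =====
-- def get_target_lines_span(lst: list[int]) -> str:
--     """
--         get the span of target lines
--     """
--     if not lst:
--         return []
--     slices = []
--     start = lst[0]
--     end = lst[0]
--
--     for i in range(1, len(lst)):
--         if lst[i] == lst[i - 1] + 1:
--             end = lst[i]
--         else:
--             if start == end:
--                 slices.append(f"line{start}")
--             else:
--                 slices.append(f"line{start}~{end}")
--             start = lst[i]
--             end = lst[i]
--
--     if start == end:
--         slices.append(f"line{start}")
--     else: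
--         slices.append(f"line{start}~{end}")
--
--     res = '\n\n'.join(slices)
--     return res
-- ===== SOURCE B (Python) =====
-- def get_target_lines_span(lst: list[int]) -> str:
--     """
--         get the span of target lines
--     """
--     if not lst:
--         return []
--     n = len(lst)
--     # a run of consecutive integers has constant value-minus-index key
--     keys = [v - i for i, v in enumerate(lst)]
--     # boundaries = indices where the key changes, framed by 0 and n
--     bounds = [0] + [i for i in range(1, n) if keys[i] != keys[i - 1]] + [n]
--     parts = []
--     for b, e in zip(bounds, bounds[1:]):
--         s, t = lst[b], lst[e - 1]
--         parts.append(f"line{s}" if s == t else f"line{s}~{t}")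
--     return '\n\n'.join(parts)
-- ===== Notes on version B (the rewrite author's own statement) =====
-- stated objective: alternative
-- what changed: B computes a derived key array keys[i]=lst[i]-i (constant exactly on a consecutive run), collects the boundary indices where the key changes, and formats each span by indexing lst at consecutive boundary pairs, instead of A's single stateful scan tracking start/end and emitting inline.
-- outside the precondition, e.g. on get_target_lines_span([]): A returns [], B returns []
import Mathlib
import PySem

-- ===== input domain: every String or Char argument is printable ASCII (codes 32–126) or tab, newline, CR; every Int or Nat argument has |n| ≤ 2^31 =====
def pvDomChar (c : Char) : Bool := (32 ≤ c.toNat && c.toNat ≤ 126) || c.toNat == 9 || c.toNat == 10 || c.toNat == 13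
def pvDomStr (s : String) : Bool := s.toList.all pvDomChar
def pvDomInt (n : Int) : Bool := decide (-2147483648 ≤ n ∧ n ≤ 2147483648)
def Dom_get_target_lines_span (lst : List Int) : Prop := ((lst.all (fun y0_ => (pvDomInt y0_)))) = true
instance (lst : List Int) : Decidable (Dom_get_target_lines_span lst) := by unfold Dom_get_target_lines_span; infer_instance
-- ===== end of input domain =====

-- B detects span boundaries through a derived key array (value minus index, constant on each
-- consecutive run) and formats boundary-index pairs, instead of A's stateful start/end scan
-- (objective: alternative).

-- ===== PORT A =====
-- f"line{start}" / f"line{start}~{end}"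
def fmtA (s e : Int) : String :=
  if s = e then "line" ++ PySem.Int.toStr s
  else "line" ++ PySem.Int.toStr s ++ "~" ++ PySem.Int.toStr e

def get_target_lines_span (lst : List Int) : String :=
  match lst with
  | [] => ""   -- Python A returns the LIST []; not a str, excluded by Pre_
  | x :: _ =>
    -- state (slices, start, end); for i in range(1, len(lst)) over lst[i], lst[i-1]
    let res := (PySem.List.pyRange 1 (lst.length : Int) 1).foldl
      (fun (st : List String × Int × Int) (i : Int) =>
        if PySem.List.pyGetD lst i 0 = PySem.List.pyGetD lst (i - 1) 0 + 1 then
          (st.1, st.2.1, PySem.List.pyGetD lst i 0)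
        else
          (st.1 ++ [fmtA st.2.1 st.2.2], PySem.List.pyGetD lst i 0, PySem.List.pyGetD lst i 0))
      ([], x, x)
    PySem.Str.join "\n\n" (res.1 ++ [fmtA res.2.1 res.2.2])

-- ===== PORT B =====
-- body of B's formatting loop: s, t = lst[b], lst[e-1]; f"line{s}" if s == t else f"line{s}~{t}"
def fmtB (lst : List Int) (p : Int × Int) : String :=
  let s := PySem.List.pyGetD lst p.1 0
  let t := PySem.List.pyGetD lst (p.2 - 1) 0
  if s = t then "line" ++ PySem.Int.toStr s
  else "line" ++ PySem.Int.toStr s ++ "~" ++ PySem.Int.toStr t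

def get_target_lines_span_alt (lst : List Int) : String :=
  match lst with
  | [] => ""   -- Python B returns the LIST []; not a str, excluded by Pre_
  | _ :: _ =>
    let n : Int := (lst.length : Int)
    -- keys = [v - i for i, v in enumerate(lst)]
    let keys := (PySem.List.enumerate lst).map (fun p => p.2 - p.1)
    -- bounds = [0] + [i for i in range(1, n) if keys[i] != keys[i-1]] + [n]
    let bounds := 0 :: ((PySem.List.pyRange 1 n 1).filter
        (fun i => !(PySem.List.pyGetD keys i 0 == PySem.List.pyGetD keys (i - 1) 0))) ++ [n]
    -- for b, e in zip(bounds, bounds[1:]): parts.append(…)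
    let parts := (bounds.zip bounds.tail).map (fmtB lst)
    PySem.Str.join "\n\n" parts

-- ===== PRECONDITION & SPEC =====
-- Pre_ excludes only the empty list, on which both Pythons return the list [] — not a value of the
-- declared str return type.
def Pre_get_target_lines_span (lst : List Int) : Prop := lst ≠ []
instance (lst : List Int) : Decidable (Pre_get_target_lines_span lst) := by
  unfold Pre_get_target_lines_span; infer_instance

def pvWitness_get_target_lines_span : List Int := [1, 2, 5]

def Spec_get_target_lines_span (lst : List Int) (out : String) : Prop := out = get_target_lines_span_alt lst
instance (lst : List Int) (out : String) : Decidable (Spec_get_target_lines_span lst out) := by unfold Spec_get_target_lines_span; infer_instance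

-- ===== CLAIM (what is proved, stated in full; the proofs are below) =====
def Claim_equal_get_target_lines_span : Prop := ∀ (lst : List Int), Dom_get_target_lines_span lst → Pre_get_target_lines_span lst → Spec_get_target_lines_span lst (get_target_lines_span lst)

-- ===== LEMMAS AND PROOFS =====

-- common characterisation: the (start, end) pairs of the maximal consecutive runs
def runs2 : Int → Int → List Int → List (Int × Int)
  | s, e, [] => [(s, e)]
  | s, e, y :: r => if y = e + 1 then runs2 s y r else (s, e) :: runs2 y y r

------------------------------------------------------------------ A side

-- generic loop over (prev, cur) adjacent pairs, carrying the previous value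
def goPairs {σ : Type} (f : σ → Int → Int → σ) : σ → Int → List Int → σ
  | st, _, [] => st
  | st, p, x :: r => goPairs f (f st p x) x r

-- A's index loop over range(k+1, len) reading lst[i-1], lst[i] is the pair loop on the suffix
theorem foldl_adj_aux {σ : Type} (f : σ → Int → Int → σ) (lst : List Int) :
    ∀ (d k : Nat) (init : σ), lst.length = k + 1 + d →
    (PySem.List.pyRange ((k : Int) + 1) (lst.length : Int) 1).foldl
        (fun st i => f st (PySem.List.pyGetD lst (i - 1) 0) (PySem.List.pyGetD lst i 0)) init
      = goPairs f init (lst.getD k 0) (lst.drop (k + 1)) := by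
  intro d
  induction d with
  | zero =>
    intro k init hlen
    rw [PySem.List.pyRange_one_eq_nil (by omega)]
    rw [List.drop_eq_nil_of_le (by omega)]
    simp [goPairs]
  | succ d ih =>
    intro k init hlen
    have hk1 : k + 1 < lst.length := by omega
    rw [PySem.List.pyRange_one_cons (by omega)]
    simp only [List.foldl_cons]
    have hx : ((k : Int) + 1 + 1) = ((k + 1 : Nat) : Int) + 1 := by push_cast; ring
    have hi : ((k : Int) + 1 - 1) = ((k : Nat) : Int) := by ring
    rw [hx, hi]
    rw [ih (k + 1) _ (by omega)]
    have hget1 : PySem.List.pyGetD lst ((k : Nat) : Int) 0 = lst.getD k 0 :=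
      PySem.List.pyGetD_natCast lst k 0
    have hget2 : PySem.List.pyGetD lst ((k : Int) + 1) 0 = lst.getD (k + 1) 0 := by
      have hc : ((k : Int) + 1) = ((k + 1 : Nat) : Int) := by push_cast; ring
      rw [hc, PySem.List.pyGetD_natCast]
    rw [hget1, hget2]
    have hdrop : lst.drop (k + 1) = lst[k + 1]'hk1 :: lst.drop (k + 2) := by
      rw [List.drop_eq_getElem_cons hk1]
    rw [hdrop]
    have hgd : lst.getD (k + 1) 0 = lst[k + 1]'hk1 := by
      rw [List.getD_eq_getElem lst 0 hk1]
    rw [goPairs, hgd]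

-- A's loop body as a pair function
def stepA (st : List String × Int × Int) (p c : Int) : List String × Int × Int :=
  if c = p + 1 then (st.1, st.2.1, c)
  else (st.1 ++ [fmtA st.2.1 st.2.2], c, c)

-- A's tail of the loop, fused with the final append of fmt(start, end)
def goA : List String → Int → Int → List Int → List String
  | acc, s, e, [] => acc ++ [fmtA s e]
  | acc, s, e, x :: r =>
    if x = e + 1 then goA acc s x r else goA (acc ++ [fmtA s e]) x x r

-- when the carried prev equals the carried end, the stepA pair loop is goA
theorem goPairs_stepA (rest : List Int) : ∀ (acc : List String) (s e : Int),
    (goPairs stepA (acc, s, e) e rest).1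
        ++ [fmtA (goPairs stepA (acc, s, e) e rest).2.1 (goPairs stepA (acc, s, e) e rest).2.2]
      = goA acc s e rest := by
  induction rest with
  | nil => intro acc s e; simp [goPairs, goA]
  | cons x r ih =>
    intro acc s e
    by_cases h : x = e + 1
    · simp only [goPairs, goA, stepA, if_pos h]
      exact ih acc s x
    · simp only [goPairs, goA, stepA, if_neg h]
      exact ih (acc ++ [fmtA s e]) x x

-- goA is formatting of the runs
theorem goA_runs2 (rest : List Int) : ∀ (acc : List String) (s e : Int),
    goA acc s e rest = acc ++ (runs2 s e rest).map (fun p => fmtA p.1 p.2) := by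
  induction rest with
  | nil => intro acc s e; simp [goA, runs2]
  | cons x r ih =>
    intro acc s e
    by_cases h : x = e + 1
    · simp only [goA, runs2, if_pos h]; exact ih acc s x
    · simp only [goA, runs2, if_neg h]
      rw [ih (acc ++ [fmtA s e]) x x]; simp

------------------------------------------------------------------ B side

-- boundary indices of the key-change positions, computed structurally
def bnds : Int → Int → List Int → List Int
  | _, _, [] => []
  | i, p, y :: r => if y = p + 1 then bnds (i + 1) y r else i :: bnds (i + 1) y r

-- the filtered index range of key-change positions is bnds
theorem filter_bnds (lst : List Int) : ∀ (rest : List Int) (j : Int) (prev : Int),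
    0 ≤ j → j + 1 + rest.length = (lst.length : Int) →
    PySem.List.pyGetD lst j 0 = prev →
    (∀ k : Nat, k < rest.length → PySem.List.pyGetD lst (j + 1 + k) 0 = rest.getD k 0) →
    ((PySem.List.pyRange (j + 1) (lst.length : Int) 1).filter
        (fun i => !(PySem.List.pyGetD lst i 0 == PySem.List.pyGetD lst (i - 1) 0 + 1)))
      = bnds (j + 1) prev rest := by
  intro rest
  induction rest with
  | nil =>
    intro j prev _ hlen _ _
    rw [PySem.List.pyRange_one_eq_nil (by simp at hlen; omega)]
    simp [bnds]
  | cons y r ih =>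
    intro j prev hj hlen hp hal
    have hy : PySem.List.pyGetD lst (j + 1) 0 = y := by
      have := hal 0 (by simp)
      simpa using this
    rw [PySem.List.pyRange_one_cons (by simp at hlen ⊢; omega)]
    rw [List.filter_cons]
    have hpred : (!(PySem.List.pyGetD lst (j + 1) 0 == PySem.List.pyGetD lst (j + 1 - 1) 0 + 1))
        = !(y == prev + 1) := by
      have : j + 1 - 1 = j := by ring
      rw [this, hy, hp]
    rw [hpred]
    have hrec : ((PySem.List.pyRange (j + 1 + 1) (lst.length : Int) 1).filter
        (fun i => !(PySem.List.pyGetD lst i 0 == PySem.List.pyGetD lst (i - 1) 0 + 1)))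
        = bnds (j + 1 + 1) y r := by
      apply ih (j + 1) y (by omega) (by simp at hlen ⊢; omega) hy
      intro k hk
      have := hal (k + 1) (by simp; omega)
      have hc : j + (↑(k + 1) : Int) + 1 = j + 1 + 1 + k := by push_cast; ring
      rw [List.getD_cons_succ] at this
      calc PySem.List.pyGetD lst (j + 1 + 1 + ↑k) 0
          = PySem.List.pyGetD lst (j + 1 + ↑(k + 1)) 0 := by
            congr 1; push_cast; ring
        _ = r.getD k 0 := this
    by_cases hcase : y = prev + 1
    · simp only [bnds, if_pos hcase]
      have : (!(y == prev + 1)) = false := by simp [hcase]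
      rw [this]
      simpa using hrec
    · simp only [bnds, if_neg hcase]
      have : (!(y == prev + 1)) = true := by simp [hcase]
      rw [this]
      simp [hrec]

-- reading a boundary pair from the list
def readP (lst : List Int) (p : Int × Int) : Int × Int :=
  (PySem.List.pyGetD lst p.1 0, PySem.List.pyGetD lst (p.2 - 1) 0)

-- zipped consecutive boundary pairs, read back through the list, are the runs
theorem zip_bnds_runs2 (lst : List Int) : ∀ (rest : List Int) (j i0 s e : Int),
    PySem.List.pyGetD lst i0 0 = s → PySem.List.pyGetD lst j 0 = e →
    (∀ k : Nat, k < rest.length → PySem.List.pyGetD lst (j + 1 + k) 0 = rest.getD k 0) →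
    (((i0 :: (bnds (j + 1) e rest ++ [j + 1 + rest.length])).zip
        (bnds (j + 1) e rest ++ [j + 1 + rest.length])).map (readP lst))
      = runs2 s e rest := by
  intro rest
  induction rest with
  | nil =>
    intro j i0 s e hs he _
    simp only [bnds, List.length_nil, Nat.cast_zero, add_zero, List.nil_append,
      List.zip_cons_cons, List.zip_nil_right, List.map_cons, List.map_nil, runs2, readP]
    have h0 : j + 1 - 1 = j := by ring
    rw [h0, hs, he]
  | cons y r ih =>
    intro j i0 s e hs he hal
    have hy : PySem.List.pyGetD lst (j + 1) 0 = y := by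
      have := hal 0 (by simp); simpa using this
    have hal' : ∀ k : Nat, k < r.length → PySem.List.pyGetD lst (j + 1 + 1 + k) 0 = r.getD k 0 := by
      intro k hk
      have := hal (k + 1) (by simp; omega)
      rw [List.getD_cons_succ] at this
      calc PySem.List.pyGetD lst (j + 1 + 1 + ↑k) 0
          = PySem.List.pyGetD lst (j + 1 + ↑(k + 1)) 0 := by congr 1; push_cast; ring
        _ = r.getD k 0 := this
    have hlen : j + 1 + ((y :: r).length : Int) = j + 1 + 1 + (r.length : Int) := by
      simp; ring
    by_cases hcase : y = e + 1
    · simp only [bnds, if_pos hcase, runs2]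
      rw [hlen]
      exact ih (j + 1) i0 s y hs hy hal'
    · simp only [bnds, runs2, if_neg hcase]
      rw [hlen]
      have htail := ih (j + 1) (j + 1) y y hy hy hal'
      simp only [List.cons_append, List.zip_cons_cons, List.map_cons]
      rw [htail]
      congr 1
      simp only [readP]
      have : j + 1 - 1 = j := by ring
      rw [this, hs, he]

-- the key array read pointwise: keys[i] = lst[i] - i for 0 ≤ i < len
theorem keys_getD (lst : List Int) (i : Int) (h0 : 0 ≤ i) (h1 : i < (lst.length : Int)) :
    PySem.List.pyGetD ((PySem.List.enumerate lst).map (fun p => p.2 - p.1)) i 0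
      = PySem.List.pyGetD lst i 0 - i := by
  have hlen : ((PySem.List.enumerate lst).map (fun p => p.2 - p.1)).length = lst.length := by
    simp [PySem.List.length_enumerate]
  rw [PySem.List.pyGetD_eq_getElem _ 0 h0 (by rw [hlen]; exact h1)]
  rw [PySem.List.pyGetD_eq_getElem lst 0 h0 h1]
  rw [List.getElem_map]
  rw [PySem.List.getElem_enumerate]
  simp only
  omega

-- ===== VERDICT (by name: the statement is the Claim_ definition above) =====
theorem get_target_lines_span_spec : Claim_equal_get_target_lines_span := by
  unfold Claim_equal_get_target_lines_span
  intro lst _ hpre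
  unfold Spec_get_target_lines_span
  match lst, hpre with
  | x :: rest, _ =>
    -- alignment of the tail
    have hal : ∀ k : Nat, k < rest.length →
        PySem.List.pyGetD (x :: rest) ((0:Int) + 1 + k) 0 = rest.getD k 0 := by
      intro k hk
      have hc : (0:Int) + 1 + (k:Int) = ((k + 1 : Nat) : Int) := by push_cast; ring
      rw [hc, PySem.List.pyGetD_natCast]
      simp
    have hx0 : PySem.List.pyGetD (x :: rest) (0:Int) 0 = x := by
      have : (0:Int) = ((0:Nat):Int) := rfl
      rw [this, PySem.List.pyGetD_natCast]; simp
    -- ===== A side = runs2 =====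
    have hfold :
        ((PySem.List.pyRange 1 (((x :: rest).length : Nat) : Int) 1).foldl
          (fun (st : List String × Int × Int) (i : Int) =>
            if PySem.List.pyGetD (x :: rest) i 0 = PySem.List.pyGetD (x :: rest) (i - 1) 0 + 1 then
              (st.1, st.2.1, PySem.List.pyGetD (x :: rest) i 0)
            else
              (st.1 ++ [fmtA st.2.1 st.2.2], PySem.List.pyGetD (x :: rest) i 0,
                PySem.List.pyGetD (x :: rest) i 0))
          ([], x, x))
        = goPairs stepA ([], x, x) x rest := by
      have h0 := foldl_adj_aux stepA (x :: rest) rest.length 0 ([], x, x) (by simp; omega)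
      simpa [stepA] using h0
    have hA : get_target_lines_span (x :: rest)
        = PySem.Str.join "\n\n" ((runs2 x x rest).map (fun p => fmtA p.1 p.2)) := by
      show PySem.Str.join "\n\n" _ = _
      rw [hfold, goPairs_stepA rest [] x x, goA_runs2 rest [] x x]
      simp
    -- ===== B side = runs2 =====
    have hn : ((x :: rest).length : Int) = 0 + 1 + (rest.length : Int) := by simp; ring
    -- the keys filter is the lst filter on the range
    have hfiltc : ((PySem.List.pyRange 1 (((x :: rest).length : Nat) : Int) 1).filter
          (fun i => !(PySem.List.pyGetD ((PySem.List.enumerate (x :: rest)).map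
              (fun p => p.2 - p.1)) i 0
            == PySem.List.pyGetD ((PySem.List.enumerate (x :: rest)).map
              (fun p => p.2 - p.1)) (i - 1) 0)))
        = ((PySem.List.pyRange 1 (((x :: rest).length : Nat) : Int) 1).filter
          (fun i => !(PySem.List.pyGetD (x :: rest) i 0
            == PySem.List.pyGetD (x :: rest) (i - 1) 0 + 1))) := by
      apply List.filter_congr
      intro i hi
      rw [PySem.List.mem_pyRange_one] at hi
      rw [keys_getD _ i (by omega) (by exact_mod_cast hi.2)]
      rw [keys_getD _ (i - 1) (by omega) (by have := hi.2; push_cast at *; omega)]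
      generalize PySem.List.pyGetD (x :: rest) i 0 = a
      generalize PySem.List.pyGetD (x :: rest) (i - 1) 0 = b
      by_cases h : a = b + 1
      · simp [h]
        omega
      · have h2 : ¬ (a - i = b - (i - 1)) := by omega
        simp [h, h2]
    have hfilt : ((PySem.List.pyRange 1 (((x :: rest).length : Nat) : Int) 1).filter
          (fun i => !(PySem.List.pyGetD (x :: rest) i 0
            == PySem.List.pyGetD (x :: rest) (i - 1) 0 + 1)))
        = bnds (0 + 1) x rest := by
      have := filter_bnds (x :: rest) rest 0 x (by omega) (by rw [hn]) hx0 hal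
      simpa using this
    have hB : get_target_lines_span_alt (x :: rest)
        = PySem.Str.join "\n\n" ((runs2 x x rest).map (fun p => fmtA p.1 p.2)) := by
      show PySem.Str.join "\n\n" _ = _
      rw [hfiltc, hfilt, hn]
      simp only [List.cons_append]
      have hz := zip_bnds_runs2 (x :: rest) rest 0 0 x x hx0 hx0 hal
      have hmap : ∀ l : List (Int × Int),
          l.map (fmtB (x :: rest)) = (l.map (readP (x :: rest))).map (fun p => fmtA p.1 p.2) := by
        intro l; rw [List.map_map]; rfl
      rw [show ((0:Int) :: (bnds (0 + 1) x rest ++ [0 + 1 + (rest.length : Int)])).tail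
          = bnds (0 + 1) x rest ++ [0 + 1 + (rest.length : Int)] from rfl]
      rw [hmap, hz]
    rw [hA, hB]
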